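-- pv_equiv track=rewrite | github.com/soy-sauce/CS-1114 | lab9/q5.py | get_common_element
-- ===== SOURCE A (Python) =====
-- def get_common_element(lst1,lst2):
--     lst3=[]
--     for i in range(len(lst1)):
--         for j in range(len(lst2)-1,-1,-1):
--             if lst1[i]==lst2[j]:
--                 lst3.append(lst2[j]);
--                 lst2.pop(j)
--     return lst3;
-- ===== SOURCE B (Python) =====
-- # Counting-dict re-implementation: O(n+m) instead of A's nested scans.
-- # Note: A mutates lst2 in place (empties matched values); B does not -- return value is identical.
-- def get_common_element(lst1, lst2):
--     counts = {}
--     for x in lst2: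
--         counts[x] = counts.get(x, 0) + 1
--     out = []
--     for v in lst1:
--         out.extend([v] * counts.get(v, 0))
--         counts[v] = 0
--     return out
-- ===== Notes on version B (the rewrite author's own statement) =====
-- stated objective: faster
-- what changed: Replaced the per-element backward scan-and-pop of lst2 with a count dictionary built once over lst2, then a single pass over lst1 emitting each value count-many times and zeroing its bucket.
import Mathlib
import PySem

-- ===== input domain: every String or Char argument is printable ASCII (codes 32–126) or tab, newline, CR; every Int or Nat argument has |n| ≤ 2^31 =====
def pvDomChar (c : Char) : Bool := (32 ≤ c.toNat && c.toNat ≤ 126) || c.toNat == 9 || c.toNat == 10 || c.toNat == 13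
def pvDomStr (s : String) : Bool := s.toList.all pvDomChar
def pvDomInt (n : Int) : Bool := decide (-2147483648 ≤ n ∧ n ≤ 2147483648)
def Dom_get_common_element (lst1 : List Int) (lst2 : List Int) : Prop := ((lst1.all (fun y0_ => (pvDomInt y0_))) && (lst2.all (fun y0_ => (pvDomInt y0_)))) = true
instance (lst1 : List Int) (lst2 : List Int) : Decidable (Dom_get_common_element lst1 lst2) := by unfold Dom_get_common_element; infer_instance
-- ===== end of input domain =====

-- B replaces A's nested backward scan-and-pop with a count dictionary over lst2 and one pass over lst1 (faster in a timing run).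
-- A mutates its lst2 argument in place (Python); the equivalence proved here is about the RETURN value only.

-- ===== PORT A =====
-- inner-loop body: 'if lst1[i]==lst2[j]: lst3.append(lst2[j]); lst2.pop(j)'; state = (lst2, lst3);
-- the 'none' match arms make the indexing total (Python never reaches them on this loop's indices)
def pvBodyA (v : Int) (st : List Int × List Int) (j : Int) : List Int × List Int :=
  match PySem.List.pyGet? st.1 j with
  | some x =>
      if v == x then
        match PySem.List.pop? st.1 j with
        | some r => (r.2, st.2 ++ [x])
        | none => st
      else st
  | none => st

-- 'for j in range(len(lst2)-1,-1,-1): …'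
def pvInnerA (v : Int) (st : List Int × List Int) : List Int × List Int :=
  (PySem.List.pyRange ((st.1.length : Int) - 1) (-1) (-1)).foldl (pvBodyA v) st

def get_common_element (lst1 : List Int) (lst2 : List Int) : List Int :=
  ((PySem.List.pyRange 0 (lst1.length : Int) 1).foldl
    (fun st i => pvInnerA (PySem.List.pyGetD lst1 i 0) st) (lst2, [])).2

-- ===== PORT B =====
def get_common_element_alt (lst1 : List Int) (lst2 : List Int) : List Int :=
  let counts := lst2.foldl (fun d x => d.insert x (d.getD x 0 + 1)) PySem.Dict.empty
  (lst1.foldl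
    (fun (p : PySem.Dict Int Int × List Int) v =>
      (p.1.insert v 0, p.2 ++ List.replicate (p.1.getD v 0).toNat v))
    (counts, [])).2

-- ===== PRECONDITION & SPEC =====
def Spec_get_common_element (lst1 : List Int) (lst2 : List Int) (out : List Int) : Prop := out = get_common_element_alt lst1 lst2
instance (lst1 : List Int) (lst2 : List Int) (out : List Int) : Decidable (Spec_get_common_element lst1 lst2 out) := by unfold Spec_get_common_element; infer_instance

-- ===== CLAIM (what is proved, stated in full; the proofs are below) =====
def Claim_equal_get_common_element : Prop := ∀ (lst1 : List Int) (lst2 : List Int), Dom_get_common_element lst1 lst2 → Spec_get_common_element lst1 lst2 (get_common_element lst1 lst2)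

-- ===== LEMMAS AND PROOFS =====

-- A's backward scan over indices j-1 … 0 removes every occurrence of v among the first j
-- elements and appends it once per occurrence.
lemma pvInnerA_range (v : Int) :
    ∀ (j : Nat) (l2 acc : List Int), j ≤ l2.length →
      (PySem.List.pyRange ((j : Int) - 1) (-1) (-1)).foldl (pvBodyA v) (l2, acc)
      = ((l2.take j).filter (fun x => !(x == v)) ++ l2.drop j,
         acc ++ List.replicate ((l2.take j).count v) v) := by
  intro j
  induction j with
  | zero =>
    intro l2 acc _
    simp
  | succ n ih =>
    intro l2 acc h
    rw [show ((n + 1 : Nat) : Int) - 1 = (n : Int) by push_cast; ring]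
    rw [PySem.List.pyRange_neg_one_cons (by omega : (-1:Int) < n)]
    have hn : n < l2.length := by omega
    simp only [List.foldl_cons]
    have hget : PySem.List.pyGet? l2 (n : Int) = some l2[n] := by
      simp [PySem.List.pyGet?_natCast, List.getElem?_eq_getElem hn]
    by_cases hv : v = l2[n]
    · have hpop : PySem.List.pop? l2 (n : Int) = some (l2[n], l2.eraseIdx n) :=
        PySem.List.pop?_natCast l2 n hn
      have hbody : pvBodyA v (l2, acc) (n : Int) = (l2.eraseIdx n, acc ++ [l2[n]]) := by
        simp [pvBodyA, hget, hpop, hv]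
      rw [hbody]
      have hlen : n ≤ (l2.eraseIdx n).length := by
        rw [List.length_eraseIdx_of_lt hn]; omega
      rw [ih _ _ hlen]
      have he : l2.eraseIdx n = l2.take n ++ l2.drop (n + 1) := List.eraseIdx_eq_take_drop_succ l2 n
      have hlt : (l2.take n).length = n := by
        simp [le_of_lt hn]
      have htake : (l2.eraseIdx n).take n = l2.take n := by
        rw [he]; exact List.take_left' hlt
      have hdrop : (l2.eraseIdx n).drop n = l2.drop (n + 1) := by
        rw [he]; exact List.drop_left' hlt
      have htakes : l2.take (n + 1) = l2.take n ++ [l2[n]] := by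
        rw [List.take_add_one, List.getElem?_eq_getElem hn]; rfl
      rw [htake, hdrop, htakes, ← hv]
      simp [List.filter_append, List.count_append, List.replicate_succ, List.append_assoc]
    · have hbody : pvBodyA v (l2, acc) (n : Int) = (l2, acc) := by
        simp [pvBodyA, hget, hv]
      rw [hbody, ih _ _ (le_of_lt hn)]
      have htakes : l2.take (n + 1) = l2.take n ++ [l2[n]] := by
        rw [List.take_add_one, List.getElem?_eq_getElem hn]; rfl
      have hdropn : l2.drop n = l2[n] :: l2.drop (n + 1) := List.drop_eq_getElem_cons hn
      have hne : (l2[n] == v) = false := by simp [Ne.symm hv]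
      simp only [Prod.mk.injEq]
      refine ⟨?_, ?_⟩
      · rw [htakes, hdropn, List.filter_append]
        simp only [List.filter_cons, hne, Bool.not_false, if_pos, List.filter_nil,
          List.append_assoc, List.singleton_append]
      · rw [htakes, List.count_append]
        simp [hne, List.count_singleton]

lemma pvInnerA_spec (v : Int) (l2 acc : List Int) :
    pvInnerA v (l2, acc)
      = (l2.filter (fun x => !(x == v)), acc ++ List.replicate (l2.count v) v) := by
  have h := pvInnerA_range v l2.length l2 acc le_rfl
  simpa [pvInnerA] using h

-- outer loops: A's (lst2, out) state and B's (counts, out) state stay related by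
-- 'counts.getD w 0 = count of w in the remaining lst2'
lemma pv_outer (lst1 : List Int) :
    ∀ (l2 acc : List Int) (d : PySem.Dict Int Int),
      (∀ w, d.getD w 0 = (l2.count w : Int)) →
      (lst1.foldl (fun st v => pvInnerA v st) (l2, acc)).2
        = (lst1.foldl
            (fun (p : PySem.Dict Int Int × List Int) v =>
              (p.1.insert v 0, p.2 ++ List.replicate (p.1.getD v 0).toNat v))
            (d, acc)).2 := by
  induction lst1 with
  | nil => intro l2 acc d _; rfl
  | cons v rest ih =>
    intro l2 acc d hinv
    simp only [List.foldl_cons]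
    rw [pvInnerA_spec]
    have hc : (d.getD v 0).toNat = l2.count v := by rw [hinv v]; simp
    rw [hc]
    apply ih
    intro w
    by_cases hw : w = v
    · rw [hw, PySem.Dict.getD_insert_self]
      have h0 : List.count v (l2.filter (fun x => !(x == v))) = 0 := by
        simp [List.count_eq_zero]
      rw [h0]
      simp
    · rw [PySem.Dict.getD_insert, if_neg hw, hinv w,
        List.count_filter (by simp [hw])]

theorem get_common_element_spec : Claim_equal_get_common_element := by
  unfold Claim_equal_get_common_element
  intro lst1 lst2 _
  unfold Spec_get_common_element get_common_element get_common_element_alt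
  rw [PySem.List.foldl_pyRange_zero_pyGetD' lst1 0 (fun st v => pvInnerA v st) (lst2, [])]
  exact pv_outer lst1 lst2 [] _ (fun w => by
    rw [PySem.Dict.getD_foldl_insert_add_one, PySem.Dict.getD_empty]; ring)
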